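-- pv_equiv track=rewrite | github.com/daniel-reich/ubiquitous-fiesta | 5ZDz5nDDPdfg5BH8K_19.py | only_5_and_3
-- ===== SOURCE A (Python) =====
-- def only_5_and_3(n):
--     flag = 0
--     for i in range(1, n):
--         for j in range(n):
--             if ((3**i) + (5*j)) == n or 5*j == n:
--                 return True
--                 break
--     else:
--         return False
-- ===== SOURCE B (Python) =====
-- def only_5_and_3(n):
--     # n is expressible iff n >= 2 and (n % 5 == 0 or n - 3**i is a
--     # nonnegative multiple of 5 for some i >= 1): test only O(log n) powers.
--     if n < 2:
--         return False
--     if n % 5 == 0: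
--         return True
--     p = 3
--     while p <= n:
--         if (n - p) % 5 == 0:
--             return True
--         p *= 3
--     return False
-- ===== Notes on version B (the rewrite author's own statement) =====
-- stated objective: faster
-- what changed: Replaced the nested scan over all pairs (i,j) up to n by a direct arithmetic test: n%5==0 plus a single loop over powers of 3 up to n checking (n-3^i)%5==0.
import Mathlib
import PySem

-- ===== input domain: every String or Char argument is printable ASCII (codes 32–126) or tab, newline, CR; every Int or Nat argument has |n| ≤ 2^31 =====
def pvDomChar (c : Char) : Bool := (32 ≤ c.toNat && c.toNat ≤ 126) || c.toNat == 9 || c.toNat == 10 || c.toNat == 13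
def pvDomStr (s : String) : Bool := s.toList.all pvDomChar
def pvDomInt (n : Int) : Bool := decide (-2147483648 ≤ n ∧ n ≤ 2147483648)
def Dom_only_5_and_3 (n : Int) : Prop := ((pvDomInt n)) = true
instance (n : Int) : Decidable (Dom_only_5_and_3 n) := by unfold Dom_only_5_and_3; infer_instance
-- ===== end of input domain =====

-- B replaces A's O(n^2) double scan over (i, j) pairs by an O(log n) test of n % 5 and of (n - 3^i) % 5 for the powers 3^i ≤ n.

-- ===== PORT A =====
def only_5_and_3 (n : Int) : Bool :=
  (PySem.List.pyRange 1 n 1).any (fun i =>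
    (PySem.List.pyRange 0 n 1).any (fun j =>
      ((3 : Int) ^ i.toNat + 5 * j == n) || (5 * j == n)))

-- ===== PORT B =====
-- the `1 ≤ p` component of the guard is only a totality aid (every call has p ≥ 3); the loop condition is `p ≤ n`
def altLoop (n p : Int) : Bool :=
  if h : 1 ≤ p ∧ p ≤ n then
    if PySem.Int.mod (n - p) 5 == 0 then true
    else altLoop n (p * 3)
  else false
termination_by (n + 1 - p).toNat
decreasing_by omega

def only_5_and_3_alt (n : Int) : Bool :=
  if n < 2 then false
  else if PySem.Int.mod n 5 == 0 then true
  else altLoop n 3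

-- ===== PRECONDITION & SPEC =====
def Spec_only_5_and_3 (n : Int) (out : Bool) : Prop := out = only_5_and_3_alt n
instance (n : Int) (out : Bool) : Decidable (Spec_only_5_and_3 n out) := by unfold Spec_only_5_and_3; infer_instance

-- ===== CLAIM (what is proved, stated in full; the proofs are below) =====
def Claim_equal_only_5_and_3 : Prop := ∀ (n : Int), Dom_only_5_and_3 n → Spec_only_5_and_3 n (only_5_and_3 n)

-- ===== LEMMAS AND PROOFS =====

-- common characterization: n ≥ 2 and (5 ∣ n or n = 3^k + 5j for some k ≥ 1, j ≥ 0)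
def GoodP (n : Int) : Prop :=
  2 ≤ n ∧ (n % 5 = 0 ∨ ∃ k : Nat, 1 ≤ k ∧ (3 : Int) ^ k ≤ n ∧ (n - 3 ^ k) % 5 = 0)

lemma pow3_ge_self (k : Nat) : (k : Int) < 3 ^ k := by
  exact_mod_cast Nat.lt_pow_self (by norm_num) (n := k)

lemma pow3_ge_three {k : Nat} (hk : 1 ≤ k) : (3 : Int) ≤ 3 ^ k := by
  calc (3 : Int) = 3 ^ 1 := (pow_one 3).symm
    _ ≤ 3 ^ k := pow_le_pow_right₀ (by norm_num) hk

lemma A_iff (n : Int) : only_5_and_3 n = true ↔ GoodP n := by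
  unfold only_5_and_3 GoodP
  simp only [List.any_eq_true, PySem.List.mem_pyRange_one, Bool.or_eq_true, beq_iff_eq]
  constructor
  · rintro ⟨i, ⟨hi1, hin⟩, j, ⟨hj0, hjn⟩, hc | hc⟩
    · refine ⟨by omega, Or.inr ⟨i.toNat, by omega, by omega, by omega⟩⟩
    · exact ⟨by omega, Or.inl (by omega)⟩
  · rintro ⟨h2, h5 | ⟨k, hk1, hkn, hmod⟩⟩
    · exact ⟨1, ⟨le_refl 1, by omega⟩, n / 5, ⟨by omega, by omega⟩, Or.inr (by omega)⟩
    · have h3 := pow3_ge_three hk1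
      have hks := pow3_ge_self k
      refine ⟨(k : Int), ⟨by exact_mod_cast hk1, by omega⟩,
        (n - 3 ^ k) / 5, ⟨by omega, by omega⟩, Or.inl ?_⟩
      rw [Int.toNat_natCast]
      omega

lemma altLoop_iff (n : Int) : ∀ (N : Nat) (p : Int), (n + 1 - p).toNat ≤ N → 1 ≤ p →
    (altLoop n p = true ↔ ∃ m : Nat, p * 3 ^ m ≤ n ∧ (n - p * 3 ^ m) % 5 = 0) := by
  intro N
  induction N with
  | zero =>
    intro p hN hp
    have hpn : ¬ p ≤ n := by omega
    rw [altLoop]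
    simp only [dif_neg (fun h : 1 ≤ p ∧ p ≤ n => hpn h.2)]
    constructor
    · intro h; exact absurd h (by simp)
    · rintro ⟨m, hle, -⟩
      have h1 : (1 : Int) ≤ 3 ^ m := one_le_pow₀ (by norm_num)
      have : p ≤ p * 3 ^ m := le_mul_of_one_le_right (by omega) h1
      omega
  | succ N ih =>
    intro p hN hp
    rw [altLoop]
    by_cases hpn : p ≤ n
    · simp only [dif_pos (show 1 ≤ p ∧ p ≤ n from ⟨hp, hpn⟩)]
      rw [PySem.Int.mod_eq_emod_of_pos (by norm_num)]
      by_cases hm : (n - p) % 5 = 0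
      · simp only [hm, beq_self_eq_true, if_true, true_iff]
        exact ⟨0, by simpa using hpn, by simpa using hm⟩
      · have hne : ((n - p) % 5 == 0) = false := by simpa using hm
        simp only [hne, Bool.false_eq_true, if_false]
        rw [ih (p * 3) (by omega) (by omega)]
        constructor
        · rintro ⟨m, hle, hmod⟩
          have e : p * 3 ^ (m + 1) = p * 3 * 3 ^ m := by ring
          exact ⟨m + 1, by rw [e]; exact hle, by rw [e]; exact hmod⟩
        · rintro ⟨m, hle, hmod⟩
          match m with
          | 0 => simp at hle hmod; omega
          | m + 1 =>
            have e : p * 3 ^ (m + 1) = p * 3 * 3 ^ m := by ring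
            rw [e] at hle hmod
            exact ⟨m, hle, hmod⟩
    · simp only [dif_neg (fun h : 1 ≤ p ∧ p ≤ n => hpn h.2)]
      constructor
      · intro h; exact absurd h (by simp)
      · rintro ⟨m, hle, -⟩
        have h1 : (1 : Int) ≤ 3 ^ m := one_le_pow₀ (by norm_num)
        have : p ≤ p * 3 ^ m := le_mul_of_one_le_right (by omega) h1
        omega

lemma B_iff (n : Int) : only_5_and_3_alt n = true ↔ GoodP n := by
  unfold only_5_and_3_alt GoodP
  by_cases h2 : n < 2
  · simp only [if_pos h2]
    constructor
    · intro h; exact absurd h (by simp)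
    · rintro ⟨h, -⟩; omega
  · rw [if_neg h2, PySem.Int.mod_eq_emod_of_pos (by norm_num)]
    by_cases h5 : n % 5 = 0
    · simp only [h5, beq_self_eq_true, if_true, true_iff]
      exact ⟨by omega, Or.inl trivial⟩
    · have hne : (n % 5 == 0) = false := by simpa using h5
      simp only [hne, Bool.false_eq_true, if_false]
      rw [altLoop_iff n (n + 1 - 3).toNat 3 (le_refl _) (by norm_num)]
      constructor
      · rintro ⟨m, hle, hmod⟩
        refine ⟨by omega, Or.inr ⟨m + 1, by omega, ?_, ?_⟩⟩ <;>
          · rw [pow_succ']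
            first | exact hle | exact hmod
      · rintro ⟨-, h5' | ⟨k, hk1, hkn, hmod⟩⟩
        · exact absurd h5' h5
        · match k, hk1 with
          | m + 1, _ =>
            rw [pow_succ'] at hkn hmod
            exact ⟨m, hkn, hmod⟩

-- ===== VERDICT (by name: the statement is the Claim_ definition above) =====
theorem only_5_and_3_spec : Claim_equal_only_5_and_3 := by
  intro n _
  unfold Spec_only_5_and_3
  rw [Bool.eq_iff_iff, A_iff, B_iff]
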